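-- pv_equiv track=rewrite | github.com/Goatherd0626/PowerRouterAndUSV | new/main.py | allocate_power
-- ===== SOURCE A (Python) =====
-- def allocate_power(P, n, max_per_port=800):
--     '''
--     分配充电功率：优先满足前面的接口，最大不超过 max_per_port。
--
--     :param P: 总功率（必须为100的倍数）
--     :param n: 接口数量
--     :param max_per_port: 每个接口的最大功率（默认500）
--     :return: 长度为n的列表，每个元素是对应接口的分配功率
--     '''
--     allocation = [0] * n
--     for i in range(n):
--         if P >= max_per_port:
--             allocation[i] = max_per_port
--             P -= max_per_port
--         else:
--             allocation[i] = P
--             P = 0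
--     return allocation
-- ===== SOURCE B (Python) =====
-- def allocate_power(P, n, max_per_port=800):
--     full = max(0, min(n, P // max_per_port))
--     remainder = [P - full * max_per_port] if full < n else []
--     return [max_per_port] * full + remainder + [0] * (n - full - 1)
-- ===== Notes on version B (the rewrite author's own statement) =====
-- stated objective: simpler
-- what changed: Replaces A's decrementing greedy per-index loop with a closed-form allocation from one integer division and list replication; Pre_ excludes non-positive max_per_port, on which A's fill of the (non-positive) cap into every port is an accident of the loop and B's division raises or floors differently.
-- outside the precondition, e.g. on allocate_power(10, 2, -5): A returns [-5, -5], B returns [10, 0]; on allocate_power(10, 2, 0): A returns [0, 0], B raises ZeroDivisionError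
import Mathlib
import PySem

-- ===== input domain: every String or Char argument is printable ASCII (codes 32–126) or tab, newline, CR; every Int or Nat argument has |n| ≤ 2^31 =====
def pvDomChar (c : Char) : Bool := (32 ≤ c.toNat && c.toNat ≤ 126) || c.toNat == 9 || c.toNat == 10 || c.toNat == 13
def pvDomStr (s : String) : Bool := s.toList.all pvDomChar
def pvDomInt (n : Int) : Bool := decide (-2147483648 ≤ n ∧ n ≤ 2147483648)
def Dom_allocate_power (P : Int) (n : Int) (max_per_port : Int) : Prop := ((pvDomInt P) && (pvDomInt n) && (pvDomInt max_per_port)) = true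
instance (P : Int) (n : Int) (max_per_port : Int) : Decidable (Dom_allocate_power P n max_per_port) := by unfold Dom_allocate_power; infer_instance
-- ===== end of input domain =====

-- B replaces A's decrementing greedy loop with a closed-form division-based allocation (simpler: replicate lists instead of per-index assignment).

-- ===== PORT A =====
-- Literal port of A: allocation = [0]*n, then for i in range(n) set allocation[i] and update P.
def allocate_power (P : Int) (n : Int) (max_per_port : Int) : List Int :=
  ((PySem.List.pyRange 0 n 1).foldl
    (fun (st : List Int × Int) (i : Int) =>
      if max_per_port ≤ st.2 then
        (PySem.List.pySetD st.1 i max_per_port, st.2 - max_per_port)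
      else
        (PySem.List.pySetD st.1 i st.2, 0))
    (List.replicate n.toNat (0 : Int), P)).1

-- ===== PORT B =====
-- Literal port of B (Source B): full-port count by integer division, one remainder entry, zero tail.
def allocate_power_alt (P : Int) (n : Int) (max_per_port : Int) : List Int :=
  let full : Int := max 0 (min n (PySem.Int.floordiv P max_per_port))
  List.replicate full.toNat max_per_port
    ++ (if full < n then [P - full * max_per_port] else [])
    ++ List.replicate (n - full - 1).toNat (0 : Int)

-- ===== PRECONDITION & SPEC =====
-- Pre_ restricts to a positive per-port cap, the function's natural domain: for max_per_port ≤ 0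
-- A still returns, but its value (the non-positive cap handed to every port once P ≥ cap) is an
-- accident of its decrementing loop, and B's division raises (cap = 0) or floors differently there.
def Pre_allocate_power (P : Int) (n : Int) (max_per_port : Int) : Prop := 0 < max_per_port
instance (P : Int) (n : Int) (max_per_port : Int) : Decidable (Pre_allocate_power P n max_per_port) := by unfold Pre_allocate_power; infer_instance
def pvWitness_allocate_power : Int × Int × Int := (1600, 3, 800)

def Spec_allocate_power (P : Int) (n : Int) (max_per_port : Int) (out : List Int) : Prop := out = allocate_power_alt P n max_per_port
instance (P : Int) (n : Int) (max_per_port : Int) (out : List Int) : Decidable (Spec_allocate_power P n max_per_port out) := by unfold Spec_allocate_power; infer_instance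

-- ===== CLAIM =====
def Claim_equal_allocate_power : Prop := ∀ (P : Int) (n : Int) (max_per_port : Int), Dom_allocate_power P n max_per_port → Pre_allocate_power P n max_per_port → Spec_allocate_power P n max_per_port (allocate_power P n max_per_port)

-- ===== LEMMAS AND PROOFS =====

-- The value of A's loop as a structural recursion on the number of remaining ports.
def pvBuild (m : Int) : Nat → Int → List Int
  | 0, _ => []
  | k + 1, P => if m ≤ P then m :: pvBuild m k (P - m) else P :: pvBuild m k 0

lemma pvSet_append (pref t : List Int) (x v : Int) :
    (pref ++ x :: t).set pref.length v = pref ++ v :: t := by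
  induction pref with
  | nil => rfl
  | cons a l ih => simp [ih]

-- A's foldl-with-set loop, generalized over an already-filled prefix, equals pvBuild.
lemma pvLoop_eq (m : Int) : ∀ (k : Nat) (P : Int) (pref : List Int),
    ((PySem.List.pyRange (pref.length : Int) ((pref.length : Int) + (k : Int)) 1).foldl
      (fun (st : List Int × Int) (i : Int) =>
        if m ≤ st.2 then (PySem.List.pySetD st.1 i m, st.2 - m)
        else (PySem.List.pySetD st.1 i st.2, 0))
      (pref ++ List.replicate k (0 : Int), P)).1 = pref ++ pvBuild m k P := by
  intro k
  induction k with
  | zero =>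
    intro P pref
    simp [PySem.List.pyRange, pvBuild]
  | succ k ih =>
    intro P pref
    rw [PySem.List.pyRange_one_cons (by push_cast; omega)]
    rw [List.foldl_cons]
    by_cases h : m ≤ P
    · have hset : PySem.List.pySetD (pref ++ List.replicate (k + 1) (0 : Int)) (pref.length : Int) m
          = (pref ++ [m]) ++ List.replicate k (0 : Int) := by
        rw [PySem.List.pySetD_natCast]
        rw [List.replicate_succ, pvSet_append]
        simp
      simp only [if_pos h, hset]
      have hih := ih (P - m) (pref ++ [m])
      have hlen : (pref ++ [m]).length = pref.length + 1 := by simp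
      rw [hlen] at hih
      push_cast at hih ⊢
      rw [show ((pref.length : Int) + ((k : Int) + 1)) = ((pref.length : Int) + 1) + (k : Int) from by ring]
      rw [hih]
      simp [pvBuild, h]
    · have hset : PySem.List.pySetD (pref ++ List.replicate (k + 1) (0 : Int)) (pref.length : Int) P
          = (pref ++ [P]) ++ List.replicate k (0 : Int) := by
        rw [PySem.List.pySetD_natCast]
        rw [List.replicate_succ, pvSet_append]
        simp
      simp only [if_neg h, hset]
      have hih := ih 0 (pref ++ [P])
      have hlen : (pref ++ [P]).length = pref.length + 1 := by simp
      rw [hlen] at hih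
      push_cast at hih ⊢
      rw [show ((pref.length : Int) + ((k : Int) + 1)) = ((pref.length : Int) + 1) + (k : Int) from by ring]
      rw [hih]
      simp [pvBuild, h]

lemma pvA_eq_build (P n m : Int) : allocate_power P n m = pvBuild m n.toNat P := by
  unfold allocate_power
  by_cases hn : n ≤ 0
  · have h0 : n.toNat = 0 := by omega
    have : PySem.List.pyRange 0 n 1 = [] := by
      simp [PySem.List.pyRange]
      omega
    simp [this, h0, pvBuild]
  · have hcast : (n.toNat : Int) = n := by omega
    have := pvLoop_eq m n.toNat P []
    simp only [List.length_nil, Nat.cast_zero, zero_add, List.nil_append] at this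
    rw [hcast] at this
    exact this

-- B's closed form evaluated at a Nat length.
def pvClosed (m : Int) (k : Nat) (P : Int) : List Int :=
  let full : Int := max 0 (min (k : Int) (PySem.Int.floordiv P m))
  List.replicate full.toNat m
    ++ (if full < (k : Int) then [P - full * m] else [])
    ++ List.replicate ((k : Int) - full - 1).toNat (0 : Int)

lemma pvBuild_zero (m : Int) (hm : 0 < m) : ∀ (k : Nat), pvBuild m k 0 = List.replicate k 0 := by
  intro k
  induction k with
  | zero => simp [pvBuild]
  | succ k ih =>
    simp [pvBuild, if_neg (by omega : ¬ m ≤ (0:Int)), ih, List.replicate_succ]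

lemma pvBuild_eq_closed (m : Int) (hm : 0 < m) : ∀ (k : Nat) (P : Int), pvBuild m k P = pvClosed m k P := by
  intro k
  induction k with
  | zero => intro P; simp [pvBuild, pvClosed]
  | succ k ih =>
    intro P
    by_cases hP : m ≤ P
    · have h1 : 1 ≤ PySem.Int.floordiv P m := by
        rw [(PySem.Int.le_floordiv_iff_mul_le hm)]; omega
      have hstep : PySem.Int.floordiv (P - m) m = PySem.Int.floordiv P m - 1 := by
        rw [PySem.Int.floordiv_eq_ediv_of_pos hm, PySem.Int.floordiv_eq_ediv_of_pos hm]
        rw [show P - m = P + (-1) * m from by ring, Int.add_mul_ediv_right _ _ (by omega : m ≠ 0)]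
        omega
      simp only [pvBuild, if_pos hP, ih (P - m)]
      set q := PySem.Int.floordiv P m with hq
      simp only [pvClosed, hstep, ← hq]
      push_cast
      have hf' : max 0 (min ((k : Int)) (q - 1)) = min ((k : Int)) (q - 1) := by omega
      have hf : max 0 (min ((k : Int) + 1) q) = min ((k : Int)) (q - 1) + 1 := by omega
      rw [hf', hf]
      set f := min ((k : Int)) (q - 1) with hfdef
      have hf0 : 0 ≤ f := by omega
      rw [show (f + 1).toNat = f.toNat + 1 from by omega, List.replicate_succ]
      rw [show ((k : Int) + 1 - (f + 1) - 1).toNat = ((k : Int) - f - 1).toNat from by omega]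
      rw [show P - (f + 1) * m = P - m - f * m from by ring]
      have hcond : (f + 1 < (k : Int) + 1) ↔ (f < (k : Int)) := by omega
      by_cases hc : f < (k : Int)
      · rw [if_pos hc, if_pos (by omega : f + 1 < (k : Int) + 1)]
        simp
      · rw [if_neg hc, if_neg (by omega : ¬ (f + 1 < (k : Int) + 1))]
        simp
    · have hq : PySem.Int.floordiv P m < 1 := by
        rw [(PySem.Int.floordiv_lt_iff_lt_mul hm)]; omega
      simp only [pvBuild, if_neg hP, pvBuild_zero m hm k]
      simp only [pvClosed]
      push_cast
      rw [show max 0 (min ((k : Int) + 1) (PySem.Int.floordiv P m)) = 0 from by omega]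
      rw [if_pos (by omega : (0:Int) < (k : Int) + 1)]
      rw [show ((k : Int) + 1 - 0 - 1).toNat = k from by omega]
      simp

lemma pvAlt_eq_closed (P n m : Int) (hn : 0 ≤ n) : allocate_power_alt P n m = pvClosed m n.toNat P := by
  unfold allocate_power_alt pvClosed
  rw [show ((n.toNat : Int)) = n from by omega]

lemma pvAlt_neg (P n m : Int) (hn : n < 0) : allocate_power_alt P n m = [] := by
  unfold allocate_power_alt
  have h1 : max 0 (min n (PySem.Int.floordiv P m)) = 0 := by
    have := min_le_left n (PySem.Int.floordiv P m)
    omega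
  simp only [h1]
  rw [if_neg (by omega : ¬ (0:Int) < n)]
  rw [show (n - 0 - 1).toNat = 0 from by omega]
  simp

-- ===== VERDICT =====
theorem allocate_power_spec : Claim_equal_allocate_power := by
  intro P n m _ hm
  unfold Spec_allocate_power
  by_cases hn : 0 ≤ n
  · rw [pvA_eq_build, pvAlt_eq_closed P n m hn, pvBuild_eq_closed m hm]
  · rw [pvA_eq_build, pvAlt_neg P n m (by omega)]
    have h0 : n.toNat = 0 := by omega
    rw [h0]
    rfl
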